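-- pv_equiv track=rewrite | github.com/alexandershov/competitive_programming | src/competitive_programming/chapter_6.py | has_valid_tiling
-- ===== SOURCE A (Python) =====
-- def has_valid_tiling(row: str, k: int, height: int) -> bool:
--     forbidden = set()
--     if k == 0:
--         forbidden.add('v')
--     if k == height - 1:
--         forbidden.add('^')
--
--     for i, tile_part in enumerate(row):
--         if tile_part in forbidden:
--             return False
--         if tile_part == '>':
--             if i == 0:
--                 return False
--             if row[i - 1] != '<':
--                 return False
--         if tile_part == '<':
--             if i == len(row) - 1:
--                 return False
--             if row[i + 1] != '>':
--                 return False
--     return True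
-- ===== SOURCE B (Python) =====
-- def has_valid_tiling(row: str, k: int, height: int) -> bool:
--     forbidden = set()
--     if k == 0:
--         forbidden.add('v')
--     if k == height - 1:
--         forbidden.add('^')
--
--     i = 0
--     n = len(row)
--     while i < n:
--         c = row[i]
--         if c in forbidden:
--             return False
--         if c == '<':
--             if i + 1 < n and row[i + 1] == '>':
--                 i += 2
--             else:
--                 return False
--         elif c == '>':
--             return False
--         else:
--             i += 1
--     return True
-- ===== Notes on version B (the rewrite author's own statement) =====
-- stated objective: alternative
-- what changed: Replaced the per-character neighbour-lookup validation (row[i-1]/row[i+1] checks for each '<' and '>') by a forward-only tokenizer that consumes a '<>' pair as one unit (stride 2) and rejects any standalone '>' immediately, never re-reading a character.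
import Mathlib
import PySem

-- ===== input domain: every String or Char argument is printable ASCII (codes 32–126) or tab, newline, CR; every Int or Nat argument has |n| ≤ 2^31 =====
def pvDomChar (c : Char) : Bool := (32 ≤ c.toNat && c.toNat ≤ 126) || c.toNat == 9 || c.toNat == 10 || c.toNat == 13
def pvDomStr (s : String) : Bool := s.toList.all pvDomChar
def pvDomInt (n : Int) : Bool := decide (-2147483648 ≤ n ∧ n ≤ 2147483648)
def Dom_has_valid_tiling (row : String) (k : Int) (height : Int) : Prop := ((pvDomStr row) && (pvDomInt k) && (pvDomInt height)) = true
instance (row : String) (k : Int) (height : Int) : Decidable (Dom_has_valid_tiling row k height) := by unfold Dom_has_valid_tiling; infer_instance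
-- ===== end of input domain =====

-- B validates the row with a forward-only tokenizer consuming '<>' pairs as one unit,
-- instead of A's per-character neighbour lookups; same cost, no re-reads (objective: alternative).

-- ===== PORT A =====
-- forbidden set: add 'v' if k == 0, then '^' if k == height - 1 (as in A)
def hvtForb (k : Int) (height : Int) : List Char :=
  (if k = 0 then ['v'] else []) ++ (if k = height - 1 then ['^'] else [])

-- A's loop: i is the enumerate index, rem the remaining characters; neighbour
-- lookups row[i-1] / row[i+1] are ported with PySem.List.pyGet? on the full list.
def hvtLoopA (chars forb : List Char) (i : Nat) : List Char → Bool
  | [] => true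
  | c :: rest =>
    if c ∈ forb then false
    else if c = '>' ∧ i = 0 then false
    else if c = '>' ∧ PySem.List.pyGet? chars ((i : Int) - 1) ≠ some '<' then false
    else if c = '<' ∧ (i : Int) = (chars.length : Int) - 1 then false
    else if c = '<' ∧ PySem.List.pyGet? chars ((i : Int) + 1) ≠ some '>' then false
    else hvtLoopA chars forb (i + 1) rest

def has_valid_tiling (row : String) (k : Int) (height : Int) : Bool :=
  hvtLoopA row.toList (hvtForb k height) 0 row.toList

-- ===== PORT B =====
-- B's while loop: consume one ordinary character, or a '<>' pair at once; a
-- standalone '>' (or '<' not followed by '>') fails immediately.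
def hvtLoopB (forb : List Char) : List Char → Bool
  | [] => true
  | c :: rest =>
    if c ∈ forb then false
    else if c = '<' then
      match rest with
      | [] => false
      | d :: rest' => if d = '>' then hvtLoopB forb rest' else false
    else if c = '>' then false
    else hvtLoopB forb rest

def has_valid_tiling_alt (row : String) (k : Int) (height : Int) : Bool :=
  hvtLoopB (hvtForb k height) row.toList

-- ===== PRECONDITION & SPEC =====
def Spec_has_valid_tiling (row : String) (k : Int) (height : Int) (out : Bool) : Prop := out = has_valid_tiling_alt row k height
instance (row : String) (k : Int) (height : Int) (out : Bool) : Decidable (Spec_has_valid_tiling row k height out) := by unfold Spec_has_valid_tiling; infer_instance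

-- ===== CLAIM (what is proved, stated in full; the proofs are below) =====
def Claim_equal_has_valid_tiling : Prop := ∀ (row : String) (k : Int) (height : Int), Dom_has_valid_tiling row k height → Spec_has_valid_tiling row k height (has_valid_tiling row k height)

-- ===== LEMMAS AND PROOFS =====

theorem hvtForb_no_arrow (k height : Int) : '>' ∉ hvtForb k height := by
  unfold hvtForb
  split <;> split <;> simp


theorem hvtLoopB_cons (forb : List Char) (c : Char) (rest : List Char) :
    hvtLoopB forb (c :: rest) =
      (if c ∈ forb then false
       else if c = '<' then
         (match rest with
          | [] => false
          | d :: rest' => if d = '>' then hvtLoopB forb rest' else false)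
       else if c = '>' then false
       else hvtLoopB forb rest) := by
  rw [hvtLoopB.eq_def]

theorem hvtLoopA_cons (chars forb : List Char) (i : Nat) (c : Char) (rest : List Char) :
    hvtLoopA chars forb i (c :: rest) =
      (if c ∈ forb then false
       else if c = '>' ∧ i = 0 then false
       else if c = '>' ∧ PySem.List.pyGet? chars ((i : Int) - 1) ≠ some '<' then false
       else if c = '<' ∧ (i : Int) = (chars.length : Int) - 1 then false
       else if c = '<' ∧ PySem.List.pyGet? chars ((i : Int) + 1) ≠ some '>' then false
       else hvtLoopA chars forb (i + 1) rest) := by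
  rw [hvtLoopA.eq_def]

theorem hvt_get_of_drop {chars rest : List Char} {c : Char} {i : Nat}
    (h : chars.drop i = c :: rest) : PySem.List.pyGet? chars (i : Int) = some c := by
  rw [PySem.List.pyGet?_natCast, ← List.head?_drop, h]; rfl

theorem hvt_loop_eq (chars forb : List Char) (harrow : '>' ∉ forb) :
    ∀ rest i, chars.drop i = rest →
      (i = 0 ∨ PySem.List.pyGet? chars ((i : Int) - 1) ≠ some '<') →
      hvtLoopA chars forb i rest = hvtLoopB forb rest := by
  suffices h : ∀ n (rest : List Char) i, rest.length ≤ n → chars.drop i = rest →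
      (i = 0 ∨ PySem.List.pyGet? chars ((i : Int) - 1) ≠ some '<') →
      hvtLoopA chars forb i rest = hvtLoopB forb rest by
    intro rest i h1 h2; exact h rest.length rest i le_rfl h1 h2
  intro n
  induction n with
  | zero =>
    intro rest i hlen _ _
    have : rest = [] := List.eq_nil_of_length_eq_zero (Nat.le_zero.mp hlen)
    subst this; rfl
  | succ n ih =>
  intro rest i hlen hdrop hprev
  match rest with
  | [] => rfl
  | c :: rest' =>
    have hc : PySem.List.pyGet? chars (i : Int) = some c := hvt_get_of_drop hdrop
    by_cases hf : c ∈ forb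
    · simp [hvtLoopA_cons, hvtLoopB_cons, hf]
    · by_cases hgt : c = '>'
      · subst hgt
        rcases hprev with h0 | hp
        · subst h0; simp [hvtLoopA_cons, hvtLoopB_cons, hf]
        · simp [hvtLoopA_cons, hvtLoopB_cons, hf, hp]
      · by_cases hlt : c = '<'
        · subst hlt
          match rest' with
          | [] =>
            have hni : (i : Int) = (chars.length : Int) - 1 := by
              have := congrArg List.length hdrop
              simp at this
              omega
            simp [hvtLoopA_cons, hvtLoopB_cons, hf, hni]
          | d :: rest'' =>
            have hni : ¬ ((i : Int) = (chars.length : Int) - 1) := by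
              have := congrArg List.length hdrop
              simp at this
              omega
            have hdrop1 : chars.drop (i + 1) = d :: rest'' := by
              have h1 : chars.drop (i + 1) = (chars.drop i).drop 1 := by
                rw [List.drop_drop, Nat.add_comm]
              rw [h1, hdrop]; rfl
            have hd : PySem.List.pyGet? chars ((i : Int) + 1) = some d := by
              have := hvt_get_of_drop hdrop1
              simpa using this
            by_cases hdg : d = '>'
            · subst hdg
              have hdrop2 : chars.drop (i + 2) = rest'' := by
                have : chars.drop (i + 2) = (chars.drop (i+1)).drop 1 := by
                  rw [List.drop_drop]
                rw [this, hdrop1]; rfl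
              have hprev2 : (i + 2 = 0) ∨ PySem.List.pyGet? chars (((i + 2 : Nat) : Int) - 1) ≠ some '<' := by
                right
                have : ((i + 2 : Nat) : Int) - 1 = (i : Int) + 1 := by push_cast; ring
                rw [this, hd]; simp
              have hrec := ih rest'' (i + 2)
                (by simp only [List.length_cons] at hlen; omega) hdrop2 hprev2
              have stepA : hvtLoopA chars forb i ('<' :: '>' :: rest'') =
                  hvtLoopA chars forb (i + 1) ('>' :: rest'') := by
                rw [hvtLoopA_cons]; simp [hf, hni, hd]
              have stepA2 : hvtLoopA chars forb (i + 1) ('>' :: rest'') =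
                  hvtLoopA chars forb (i + 2) rest'' := by
                rw [hvtLoopA_cons]; push_cast; simp [harrow, hc]
              have stepB : hvtLoopB forb ('<' :: '>' :: rest'') = hvtLoopB forb rest'' := by
                rw [hvtLoopB_cons]; simp [hf]
              rw [stepA, stepA2, stepB, hrec]
            · have : ¬ (PySem.List.pyGet? chars ((i : Int) + 1) = some '>') := by
                rw [hd]; simp [hdg]
              simp [hvtLoopA_cons, hvtLoopB_cons, hf, hni, this, hdg]
        · have hdrop1 : chars.drop (i + 1) = rest' := by
            have : chars.drop (i + 1) = (chars.drop i).drop 1 := by rw [List.drop_drop, Nat.add_comm]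
            rw [this, hdrop]; rfl
          have hprev1 : (i + 1 = 0) ∨ PySem.List.pyGet? chars (((i + 1 : Nat) : Int) - 1) ≠ some '<' := by
            right
            have : ((i + 1 : Nat) : Int) - 1 = (i : Int) := by push_cast; ring
            rw [this, hc]; simp [hlt]
          have hrec := ih rest' (i + 1) (by simp at hlen; omega) hdrop1 hprev1
          simp [hvtLoopA_cons, hvtLoopB_cons, hf, hgt, hlt, hrec]

-- ===== VERDICT (by name: the statement is the Claim_ definition above) =====
theorem has_valid_tiling_spec : Claim_equal_has_valid_tiling := by
  intro row k height _
  unfold Spec_has_valid_tiling has_valid_tiling has_valid_tiling_alt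
  exact hvt_loop_eq row.toList (hvtForb k height) (hvtForb_no_arrow k height) row.toList 0 (by simp) (Or.inl rfl)
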